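-- pv_equiv track=rewrite | github.com/akathorn/codejam | archive/2021/Round 1A/append/append.py | solve
-- ===== SOURCE A (Python) =====
-- from typing import List
--
-- def ndigits(number: int) -> int:
--     return len(str(number))
--
-- def diff(x: int, y: int) -> int:
--     return ndigits(x) - ndigits(y)
--
-- def solve(numbers: List[int]) -> int:
--     operations = 0
--
--     for i in range(1, len(numbers)):
--         if numbers[i] > numbers[i - 1]:
--             continue
--
--         d = diff(numbers[i - 1], numbers[i])
--         if d == 0:
--             numbers[i] *= 10
--             operations += 1
--             continue
--
--         # last_x = numbers[i] % 10
--         # last_y = (numbers[i - 1] % (10 ** (d + 1))) // (10 ** (d))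
--
--         last_x = numbers[i]
--         last_y = (numbers[i - 1] // (10 ** d)) % (10 ** ndigits(numbers[i]))
--
--         if last_x > last_y:
--             numbers[i] *= 10 ** d
--             operations += d
--         elif last_x < last_y:
--             numbers[i] *= 10 ** (d + 1)
--             operations += d + 1
--         # elif last_x == 0 and last_y == 0:
--         #     numbers[i] *= 10 ** (d + 1)
--         #     operations += d + 1
--         else:
--             diff_digits = numbers[i - 1] % (10 ** d)
--             new_digits = diff_digits + 1
--             if new_digits == 10 ** d:  # It was all 9's
--                 numbers[i] *= 10 ** (d + 1)
--                 operations += d + 1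
--                 continue
--             else:
--                 numbers[i] *= 10 ** d
--                 numbers[i] += new_digits
--                 operations += d
--                 continue
--
--     return operations
-- ===== SOURCE B (Python) =====
-- from typing import List
--
-- def solve(numbers: List[int]) -> int:
--     # Greedy: for each element find the minimal number k of appended digits
--     # that can make it exceed the previous value. Does not mutate `numbers`
--     # (A mutates its argument in place; only the return value is compared).
--     operations = 0
--     prev = numbers[0] if numbers else 0
--     for p in numbers[1:]:
--         if p > prev:
--             prev = p
--             continue
--         k = 0
--         while (p + 1) * 10 ** k - 1 <= prev:
--             k += 1
--         prev = max(p * 10 ** k, prev + 1)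
--         operations += k
--     return operations
-- ===== Notes on version B (the rewrite author's own statement) =====
-- stated objective: simpler
-- what changed: Replaces A's digit-count/leading-digit five-way case analysis (ndigits/diff helpers, leading-digit extraction, all-9s carry branch) by a direct search for the minimal number k of appended digits with (p+1)*10^k-1 > prev, folding over values without mutating the list.
-- outside the precondition, e.g. on solve([99, 0]): A returns 2, B returns 3; on solve([5, -3]): A returns 0, B does not finish within the time limit
import Mathlib
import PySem

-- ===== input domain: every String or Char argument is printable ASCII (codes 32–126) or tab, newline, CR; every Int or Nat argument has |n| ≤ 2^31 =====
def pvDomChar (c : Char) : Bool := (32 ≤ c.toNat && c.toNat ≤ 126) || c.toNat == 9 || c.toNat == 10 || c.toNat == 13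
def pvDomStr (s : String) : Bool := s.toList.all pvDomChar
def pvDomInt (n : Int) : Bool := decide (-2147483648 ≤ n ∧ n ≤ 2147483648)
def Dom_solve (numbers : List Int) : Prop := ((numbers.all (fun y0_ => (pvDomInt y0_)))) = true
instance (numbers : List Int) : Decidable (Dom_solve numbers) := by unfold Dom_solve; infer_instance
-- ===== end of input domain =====

-- B replaces A's digit-count/leading-digit case analysis by a direct minimal-append
-- search (simpler); A mutates its argument in place while B does not — the equivalence
-- proved here is about the RETURN value only.

-- ===== PORT A =====

-- len(str(number))
def ndigitsZ (number : Int) : Int := ((PySem.Int.toChars number).length : Int)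

def diffZ (x y : Int) : Int := ndigitsZ x - ndigitsZ y

-- the body of A's `for i in range(1, len(numbers))` loop; state = (numbers, operations).
-- `10 ** d` is ported as `(10:Int) ^ d.toNat`: exact for d ≥ 0 (for d < 0 Python computes
-- a float — such inputs have a negative element and lie outside Pre_solve).
def solveStepA (st : List Int × Int) (i : Int) : List Int × Int :=
  let ns := st.1
  let ops := st.2
  let p := PySem.List.pyGetD ns i 0          -- numbers[i]; i ∈ [1, len) is always in range
  let prev := PySem.List.pyGetD ns (i - 1) 0 -- numbers[i-1]
  if p > prev then st
  else
    let d := diffZ prev p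
    if d = 0 then (PySem.List.pySetD ns i (p * 10), ops + 1)
    else
      let last_x := p
      let last_y := PySem.Int.mod (PySem.Int.floordiv prev ((10:Int) ^ d.toNat))
                      ((10:Int) ^ (ndigitsZ p).toNat)
      if last_x > last_y then (PySem.List.pySetD ns i (p * (10:Int) ^ d.toNat), ops + d)
      else if last_x < last_y then (PySem.List.pySetD ns i (p * (10:Int) ^ (d.toNat + 1)), ops + (d + 1))
      else
        let diff_digits := PySem.Int.mod prev ((10:Int) ^ d.toNat)
        let new_digits := diff_digits + 1
        if new_digits = (10:Int) ^ d.toNat then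
          (PySem.List.pySetD ns i (p * (10:Int) ^ (d.toNat + 1)), ops + (d + 1))
        else
          (PySem.List.pySetD ns i (p * (10:Int) ^ d.toNat + new_digits), ops + d)

def solve (numbers : List Int) : Int :=
  ((PySem.List.pyRange 1 (numbers.length : Int)).foldl solveStepA (numbers, 0)).2

-- ===== PORT B =====

-- the `while (p + 1) * 10 ** k - 1 <= prev: k += 1` loop of Source B; the fuel argument is a
-- totality guard only (inside Pre_solve the loop exits at some k ≤ prev.toNat + 1).
def findKGo (prev p : Int) : Nat → Nat → Nat
  | 0, k => k
  | fuel + 1, k => if (p + 1) * (10:Int) ^ k - 1 ≤ prev then findKGo prev p fuel (k + 1) else k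

-- the body of Source B's `for p in numbers[1:]` loop; state = (prev, operations).
def solveStepB (st : Int × Int) (p : Int) : Int × Int :=
  if p > st.1 then (p, st.2)
  else
    let k := findKGo st.1 p (st.1.toNat + 2) 0
    (max (p * (10:Int) ^ k) (st.1 + 1), st.2 + (k : Int))

def solve_alt (numbers : List Int) : Int :=
  match numbers with
  | [] => 0
  | h :: t => (t.foldl solveStepB (h, 0)).2

-- ===== PRECONDITION & SPEC =====

-- every non-positive element after the head must strictly exceed a negative predecessor
-- (then the greedy loop skips it and it is never "appended to")
def pvR (a b : Int) : Prop := b ≤ 0 → a < b ∧ a < 0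

-- Pre_solve covers the inputs on which A's append logic is meaningful: the problem's domain
-- is positive integers (Code Jam: 1 ≤ N_i), and Pre_solve admits any list whose non-positive
-- elements are never reached by an append step.  Excluded are lists where the loop reaches a
-- negative value — there A computes through Python float arithmetic (10 ** d with d < 0) and
-- B's minimal-append search never terminates — and lists where it reaches a 0, where A
-- "appends" by multiplying (0 * 10 ** k stays 0) and returns a total B's minimal-append
-- count does not reproduce.
def Pre_solve (numbers : List Int) : Prop := List.IsChain pvR numbers
instance (numbers : List Int) : Decidable (Pre_solve numbers) := by
  unfold Pre_solve pvR; infer_instance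

def pvWitness_solve : List Int := [1, 2, 1]

def Spec_solve (numbers : List Int) (out : Int) : Prop := out = solve_alt numbers
instance (numbers : List Int) (out : Int) : Decidable (Spec_solve numbers out) := by unfold Spec_solve; infer_instance

-- ===== CLAIM (what is proved, stated in full; the proofs are below) =====
def Claim_equal_solve : Prop := ∀ (numbers : List Int), Dom_solve numbers → Pre_solve numbers → Spec_solve numbers (solve numbers)

-- ===== LEMMAS AND PROOFS =====

-- number of decimal digits, as a Nat
def ndn (n : Int) : Nat := (PySem.Int.toChars n).length

-- length of Nat.toDigits 10 n (what len(str(n)) computes for n ≥ 0)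
theorem toDigitsCore_len_log (f : Nat) : ∀ (n : Nat) (l : List Char), 0 < n → n < f →
    (Nat.toDigitsCore 10 f n l).length = Nat.log 10 n + 1 + l.length := by
  induction f with
  | zero => intro n l h1 h2; omega
  | succ f ih =>
    intro n l h1 h2
    rw [Nat.toDigitsCore]
    by_cases h : n / 10 = 0
    · have hn : n < 10 := by omega
      simp [h, Nat.log_eq_zero_iff.mpr (Or.inl hn), Nat.add_comm]
    · simp only [h, if_false]
      have hge : 10 ≤ n := by
        rcases Nat.lt_or_ge n 10 with hl | hg
        · exact absurd (Nat.div_eq_of_lt hl) h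
        · exact hg
      have hlog : 0 < Nat.log 10 n := Nat.log_pos (by norm_num) hge
      rw [ih (n / 10) _ (Nat.pos_of_ne_zero h) (by omega)]
      rw [Nat.log_div_base]
      simp
      omega

theorem ndn_eq_log (n : Int) (h : 1 ≤ n) : ndn n = Nat.log 10 n.toNat + 1 := by
  unfold ndn PySem.Int.toChars
  rw [if_neg (by omega)]
  have := toDigitsCore_len_log (n.toNat + 1) n.toNat [] (by omega) (by omega)
  simpa [Nat.toDigits] using this

theorem ndn_bounds (n : Int) (h : 1 ≤ n) :
    (10:Int) ^ (ndn n - 1) ≤ n ∧ n < (10:Int) ^ (ndn n) ∧ 1 ≤ ndn n := by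
  rw [ndn_eq_log n h]
  have h0 : n.toNat ≠ 0 := by omega
  have hlo := Nat.pow_log_le_self 10 h0
  have hhi := Nat.lt_pow_succ_log_self (b := 10) (by norm_num) n.toNat
  have c1 : ((10:Nat) ^ Nat.log 10 n.toNat : Int) ≤ (n.toNat : Int) := by exact_mod_cast hlo
  have c2 : (n.toNat : Int) < ((10:Nat) ^ (Nat.log 10 n.toNat + 1) : Int) := by exact_mod_cast hhi
  push_cast at c1 c2
  refine ⟨?_, ?_, by omega⟩
  · simpa using c1.trans_eq (by omega)
  · calc n = (n.toNat : Int) := by omega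
      _ < _ := c2

theorem int_lt_ten_pow (m : Nat) : (m : Int) < 10 ^ m := by
  induction m with
  | zero => norm_num
  | succ k ih =>
    have h0 : (0:Int) ≤ 10 ^ k := by positivity
    push_cast
    rw [pow_succ]
    nlinarith

theorem findKGo_spec (prev p : Int) (K : Nat)
    (hK : ¬ ((p + 1) * (10:Int) ^ K - 1 ≤ prev))
    (hbelow : ∀ j, j < K → (p + 1) * (10:Int) ^ j - 1 ≤ prev) :
    ∀ (fuel k : Nat), k ≤ K → K ≤ k + fuel → findKGo prev p fuel k = K := by
  intro fuel
  induction fuel with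
  | zero =>
    intro k h1 h2
    have : findKGo prev p 0 k = k := rfl
    omega
  | succ f ih =>
    intro k h1 h2
    rw [findKGo]
    rcases eq_or_lt_of_le h1 with he | hlt
    · subst he; rw [if_neg hK]
    · rw [if_pos (hbelow k hlt)]
      exact ih (k + 1) hlt (by omega)

theorem pyGetD_mid_prev (done rest : List Int) (prev p : Int) :
    PySem.List.pyGetD (done ++ prev :: p :: rest) ((done.length : Int) + 1 - 1) 0 = prev := by
  have h : ((done.length : Int) + 1 - 1) = ((done.length : Nat) : Int) := by ring
  rw [h, PySem.List.pyGetD_natCast, List.getD_eq_getElem?_getD,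
      List.getElem?_append_right (le_refl _)]
  simp

theorem pyGetD_mid_p (done rest : List Int) (prev p : Int) :
    PySem.List.pyGetD (done ++ prev :: p :: rest) ((done.length : Int) + 1) 0 = p := by
  have h : ((done.length : Int) + 1) = ((done.length + 1 : Nat) : Int) := by push_cast; ring
  rw [h, PySem.List.pyGetD_natCast, List.getD_eq_getElem?_getD,
      List.getElem?_append_right (by omega)]
  simp

theorem pySetD_mid (done rest : List Int) (prev p v : Int) :
    PySem.List.pySetD (done ++ prev :: p :: rest) ((done.length : Int) + 1) v
      = done ++ prev :: v :: rest := by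
  rw [PySem.List.pySetD_of_nonneg _ _ (by omega)]
  have h : ((done.length : Int) + 1).toNat = done.length + 1 := by omega
  rw [h, List.set_append_right _ _ (by omega)]
  simp [List.set]

theorem pv_pair_eq {α β : Type} {l1 l2 : α} {o1 o2 : β} (h1 : l1 = l2) (h2 : o1 = o2) :
    (l1, o1) = (l2, o2) := by rw [h1, h2]

theorem stepA_continue (done rest : List Int) (prev p ops : Int) (h : p > prev) :
    solveStepA (done ++ prev :: p :: rest, ops) ((done.length : Int) + 1)
      = (done ++ prev :: p :: rest, ops) := by
  simp only [solveStepA, pyGetD_mid_prev, pyGetD_mid_p]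
  rw [if_pos h]

theorem stepB_continue (prev p ops : Int) (h : p > prev) :
    solveStepB (prev, ops) p = (p, ops) := by
  unfold solveStepB
  rw [if_pos h]

set_option maxHeartbeats 1000000 in
theorem step_main (done rest : List Int) (prev p ops : Int) (hprev : 1 ≤ prev) (hp : 1 ≤ p) :
    solveStepA (done ++ prev :: p :: rest, ops) ((done.length : Int) + 1)
      = (done ++ prev :: (solveStepB (prev, ops) p).1 :: rest, (solveStepB (prev, ops) p).2) := by
  simp only [solveStepA, solveStepB, pyGetD_mid_prev, pyGetD_mid_p]
  by_cases hgt : p > prev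
  · rw [if_pos hgt, if_pos hgt]
  · rw [if_neg hgt, if_neg hgt]
    have hle : p ≤ prev := not_lt.mp hgt
    obtain ⟨Hp1, Hp2, Ha1⟩ := ndn_bounds p hp
    obtain ⟨Hq1, Hq2, Hb1⟩ := ndn_bounds prev hprev
    have hab : ndn p ≤ ndn prev := by
      have h1 : (10:Int) ^ (ndn p - 1) < 10 ^ (ndn prev) := lt_of_le_of_lt (Hp1.trans hle) Hq2
      have h2 := (pow_lt_pow_iff_right₀ (by norm_num : (1:Int) < 10)).mp h1
      omega
    have hd : diffZ prev p = ((ndn prev : Int) - (ndn p : Int)) := rfl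
    have hbig : (ndn prev : Int) ≤ prev := by
      have h1 := int_lt_ten_pow (ndn prev - 1)
      have h2 : ((ndn prev - 1 : Nat) : Int) = (ndn prev : Int) - 1 := by omega
      have := h1.trans_le Hq1
      omega
    by_cases hd0 : diffZ prev p = 0
    · -- same number of digits
      rw [if_pos hd0]
      have hab' : ndn p = ndn prev := by rw [hd] at hd0; omega
      have h10a : (10:Int) ^ (ndn p) = 10 ^ (ndn p - 1) * 10 := by
        rw [← pow_succ]; congr 1; omega
      have hple : prev < p * 10 := by
        have h1 : (10:Int) ^ (ndn p - 1) * 10 ≤ p * 10 :=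
          mul_le_mul_of_nonneg_right Hp1 (by norm_num)
        have h2 : prev < (10:Int) ^ (ndn p) := hab' ▸ Hq2
        linarith
      have hK : findKGo prev p (prev.toNat + 2) 0 = 1 := by
        apply findKGo_spec prev p 1 _ _ (prev.toNat + 2) 0 (by omega) (by omega)
        · rw [pow_one]; intro hcon; linarith
        · intro j hj
          have : j = 0 := by omega
          subst this; simpa using hle
      rw [hK, pySetD_mid]
      have hmax : max (p * (10:Int) ^ (1:Nat)) (prev + 1) = p * 10 := by
        rw [pow_one]; exact max_eq_left (by omega)
      rw [hmax]
      norm_num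
    · -- p has strictly fewer digits
      rw [if_neg hd0]
      have hD1 : ndn p < ndn prev := by
        rw [hd] at hd0; omega
      have hdt : (diffZ prev p).toNat = ndn prev - ndn p := by rw [hd]; omega
      have hdcast : diffZ prev p = ((ndn prev - ndn p : Nat) : Int) := by rw [hd]; omega
      set D : Nat := ndn prev - ndn p with hDdef
      set a : Nat := ndn p with hadef
      have hPpos : (0:Int) < 10 ^ D := by positivity
      have hQpos : (0:Int) < 10 ^ a := by positivity
      have hQP : (10:Int) ^ (ndn prev) = 10 ^ a * 10 ^ D := by
        rw [← pow_add]; congr 1; omega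
      have hbm1 : (10:Int) ^ (ndn prev - 1) = 10 ^ (a - 1) * 10 ^ D := by
        rw [← pow_add]; congr 1; omega
      have hqnn : 0 ≤ prev / 10 ^ D := (Int.ediv_nonneg_iff_of_pos hPpos).mpr (by omega)
      have hqQ : prev / 10 ^ D < 10 ^ a :=
        (Int.ediv_lt_iff_lt_mul hPpos).mpr (by rw [← hQP]; exact Hq2)
      have hqlb : (10:Int) ^ (a - 1) ≤ prev / 10 ^ D :=
        (Int.le_ediv_iff_mul_le hPpos).mpr (by rw [← hbm1]; exact Hq1)
      set q : Int := prev / 10 ^ D with hqdef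
      set r : Int := prev % 10 ^ D with hrdef
      have hqr : 10 ^ D * q + r = prev := Int.mul_ediv_add_emod prev _
      have hr0 : 0 ≤ r := Int.emod_nonneg prev (ne_of_gt hPpos)
      have hrP : r < 10 ^ D := Int.emod_lt_of_pos prev hPpos
      have hly : PySem.Int.mod (PySem.Int.floordiv prev ((10:Int) ^ (diffZ prev p).toNat))
          ((10:Int) ^ (ndigitsZ p).toNat) = q := by
        have hnd : (ndigitsZ p).toNat = a := rfl
        rw [hdt, hnd, PySem.Int.floordiv_eq_ediv_of_pos hPpos, PySem.Int.mod_eq_emod_of_pos hQpos]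
        exact Int.emod_eq_of_lt hqnn hqQ
      have hmodr : PySem.Int.mod prev ((10:Int) ^ (diffZ prev p).toNat) = r := by
        rw [hdt, PySem.Int.mod_eq_emod_of_pos hPpos]
      have cond_below : ∀ j, j < D → (p + 1) * (10:Int) ^ j - 1 ≤ prev := by
        intro j hj
        have e1 : (p + 1) * (10:Int) ^ j ≤ 10 ^ a * 10 ^ j :=
          mul_le_mul_of_nonneg_right (by omega) (by positivity)
        have e2 : (10:Int) ^ a * 10 ^ j ≤ 10 ^ (a - 1) * 10 ^ D := by
          rw [← pow_add, ← pow_add]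
          exact pow_le_pow_right₀ (by norm_num) (by omega)
        have e3 := Hq1
        rw [hbm1] at e3
        linarith
      have hfuelD : D ≤ 0 + (prev.toNat + 2) := by
        have : (D:Int) ≤ (ndn prev : Int) := by omega
        omega
      have notcond_top : ¬ ((p + 1) * (10:Int) ^ (D + 1) - 1 ≤ prev) := by
        intro hcon
        have e1 : ((10:Int) ^ (a - 1) + 1) * 10 ^ (D + 1) ≤ (p + 1) * 10 ^ (D + 1) :=
          mul_le_mul_of_nonneg_right (by omega) (by positivity)
        have e2 : (10:Int) ^ (a - 1) * 10 ^ (D + 1) = 10 ^ (ndn prev) := by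
          rw [← pow_add]; congr 1; omega
        have e3 : (0:Int) < 10 ^ (D + 1) := by positivity
        nlinarith
      rw [hly, hmodr, hdt]
      by_cases hpgt : p > q
      · rw [if_pos hpgt]
        have hK : findKGo prev p (prev.toNat + 2) 0 = D := by
          apply findKGo_spec prev p D _ cond_below (prev.toNat + 2) 0 (by omega) (by omega)
          intro hcon
          have e1 : (q + 2) * (10:Int) ^ D ≤ (p + 1) * 10 ^ D :=
            mul_le_mul_of_nonneg_right (by omega) (by positivity)
          nlinarith
        rw [hK, pySetD_mid]
        have hmax : max (p * (10:Int) ^ D) (prev + 1) = p * 10 ^ D := by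
          apply max_eq_left
          have e1 : (q + 1) * (10:Int) ^ D ≤ p * 10 ^ D :=
            mul_le_mul_of_nonneg_right (by omega) (by positivity)
          nlinarith
        rw [hmax]
        exact pv_pair_eq rfl (by rw [hdcast])
      · by_cases hplt : p < q
        · rw [if_neg hpgt, if_pos hplt]
          have hK : findKGo prev p (prev.toNat + 2) 0 = D + 1 := by
            apply findKGo_spec prev p (D + 1) notcond_top _ (prev.toNat + 2) 0 (by omega) (by omega)
            intro j hj
            rcases Nat.lt_or_ge j D with hjD | hjD
            · exact cond_below j hjD
            · have : j = D := by omega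
              subst this
              have e1 : (p + 1) * (10:Int) ^ D ≤ q * 10 ^ D :=
                mul_le_mul_of_nonneg_right (by omega) (by positivity)
              nlinarith
          rw [hK, pySetD_mid]
          have hmax : max (p * (10:Int) ^ (D + 1)) (prev + 1) = p * 10 ^ (D + 1) := by
            apply max_eq_left
            have e1 : (10:Int) ^ (a - 1) * 10 ^ (D + 1) ≤ p * 10 ^ (D + 1) :=
              mul_le_mul_of_nonneg_right Hp1 (by positivity)
            have e2 : (10:Int) ^ (a - 1) * 10 ^ (D + 1) = 10 ^ (ndn prev) := by
              rw [← pow_add]; congr 1; omega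
            nlinarith
          rw [hmax]
          have hcast2 : ops + (diffZ prev p + 1) = ops + ((D + 1 : Nat) : Int) := by
            rw [hdcast]; push_cast; ring
          exact pv_pair_eq rfl hcast2
        · -- p = q
          rw [if_neg hpgt, if_neg hplt]
          have hpq : p = q := by omega
          have hpP : p * (10:Int) ^ D = 10 ^ D * q := by rw [hpq]; ring
          have hq1 : (1:Int) ≤ q := by
            have h1 : (1:Int) ≤ (10:Int) ^ (a - 1) := one_le_pow₀ (by norm_num)
            omega
          by_cases hnines : r + 1 = (10:Int) ^ D
          · rw [if_pos hnines]
            have hK : findKGo prev p (prev.toNat + 2) 0 = D + 1 := by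
              apply findKGo_spec prev p (D + 1) notcond_top _ (prev.toNat + 2) 0 (by omega) (by omega)
              intro j hj
              rcases Nat.lt_or_ge j D with hjD | hjD
              · exact cond_below j hjD
              · have : j = D := by omega
                subst this
                have hexp : (p + 1) * (10:Int) ^ D = p * 10 ^ D + 10 ^ D := by ring
                linarith [hpP, hqr]
            rw [hK, pySetD_mid]
            have hmax : max (p * (10:Int) ^ (D + 1)) (prev + 1) = p * 10 ^ (D + 1) := by
              apply max_eq_left
              have hp10 : p * (10:Int) ^ (D + 1) = 10 ^ D * q * 10 := by rw [hpq]; ring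
              have ht : (10:Int) ^ D ≤ 10 ^ D * q := le_mul_of_one_le_right (le_of_lt hPpos) hq1
              linarith [hqr, hnines, hp10, ht]
            rw [hmax]
            have hcast2 : ops + (diffZ prev p + 1) = ops + ((D + 1 : Nat) : Int) := by
              rw [hdcast]; push_cast; ring
            exact pv_pair_eq rfl hcast2
          · rw [if_neg hnines]
            have hr1' : r + 1 < (10:Int) ^ D := lt_of_le_of_ne (by omega) hnines
            have hK : findKGo prev p (prev.toNat + 2) 0 = D := by
              apply findKGo_spec prev p D _ cond_below (prev.toNat + 2) 0 (by omega) (by omega)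
              intro hcon
              have hexp : (p + 1) * (10:Int) ^ D = p * 10 ^ D + 10 ^ D := by ring
              linarith [hpP, hqr]
            rw [hK, pySetD_mid]
            have hmax : max (p * (10:Int) ^ D) (prev + 1) = prev + 1 := by
              apply max_eq_right
              linarith [hpP, hqr, hr0]
            rw [hmax]
            have hval : p * (10:Int) ^ D + (r + 1) = prev + 1 := by linarith [hpP, hqr]
            exact pv_pair_eq (by rw [hval]) (by rw [hdcast])

theorem loop_eq (t : List Int) : ∀ (done : List Int) (prev ops : Int),
    List.IsChain pvR (prev :: t) →
    ((PySem.List.pyRange ((done.length : Int) + 1)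
        ((done.length : Int) + 1 + (t.length : Int))).foldl solveStepA
        (done ++ prev :: t, ops)).2
      = (t.foldl solveStepB (prev, ops)).2 := by
  induction t with
  | nil =>
    intro done prev ops _
    simp [pysem]
  | cons x t ih =>
    intro done prev ops hch
    rw [List.isChain_cons_cons] at hch
    have hR : pvR prev x := hch.1
    have hchx : List.IsChain pvR (x :: t) := hch.2
    have hlt : (done.length : Int) + 1 < (done.length : Int) + 1 + ((x :: t).length : Int) := by
      simp only [List.length_cons]; push_cast; omega
    have hbnd : (done.length : Int) + 1 + ((x :: t).length : Int)
        = (done.length : Int) + 1 + 1 + (t.length : Int) := by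
      simp only [List.length_cons]; push_cast; ring
    have harg : (((done ++ [prev]).length : Nat) : Int) = (done.length : Int) + 1 := by simp
    by_cases hgt : x > prev
    · rw [PySem.List.pyRange_one_cons hlt, List.foldl_cons, stepA_continue done t prev x ops hgt]
      have hIH := ih (done ++ [prev]) x ops hchx
      rw [harg] at hIH
      have hlist : (done ++ [prev]) ++ x :: t = done ++ prev :: x :: t := by simp
      rw [hlist] at hIH
      rw [hbnd, List.foldl_cons, stepB_continue prev x ops hgt]
      exact hIH
    · have hp1 : 1 ≤ x := by
        by_contra hx
        have := hR (by omega)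
        omega
      have hprev1 : 1 ≤ prev := by omega
      rw [PySem.List.pyRange_one_cons hlt, List.foldl_cons,
          step_main done t prev x ops hprev1 hp1]
      have hchv : List.IsChain pvR ((solveStepB (prev, ops) x).1 :: t) := by
        cases t with
        | nil => simp
        | cons y t' =>
          rw [List.isChain_cons_cons] at hchx ⊢
          refine ⟨fun hy => absurd (hchx.1 hy).2 (by omega), hchx.2⟩
      have hIH := ih (done ++ [prev]) (solveStepB (prev, ops) x).1 (solveStepB (prev, ops) x).2
        hchv
      rw [harg] at hIH
      have hlist : (done ++ [prev]) ++ (solveStepB (prev, ops) x).1 :: t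
          = done ++ prev :: (solveStepB (prev, ops) x).1 :: t := by simp
      rw [hlist] at hIH
      rw [hbnd, List.foldl_cons]
      rw [← Prod.mk.eta (p := solveStepB (prev, ops) x)] at hIH ⊢
      exact hIH

theorem solve_spec : Claim_equal_solve := by
  unfold Claim_equal_solve
  intro numbers _ hpre
  unfold Spec_solve
  cases numbers with
  | nil => rfl
  | cons h t =>
    have hmain := loop_eq t [] h 0 hpre
    simp only [List.length_nil, Nat.cast_zero, List.nil_append, zero_add] at hmain
    unfold solve solve_alt
    have hlen : (((h :: t).length : Nat) : Int) = 1 + (t.length : Int) := by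
      simp only [List.length_cons]; push_cast; ring
    rw [hlen]
    exact hmain
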